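-- pv_equiv track=rewrite | github.com/MinsangKong/Study | note/2-2.py | solution
-- ===== SOURCE A (Python) =====
-- def solution(array):
--     length = len(array)
--
--     if length == 0:
--         return []
--     elif length == 1:
--         return [-1]
--     elif length == 2:
--         if array[0] > array[1]:
--             return [-1, 0]
--         else:
--             return [1, -1]
--
--     check_l = []
--     check_r = []
--     dp = [-1] * length
--     for i in range(length):
--         num = array[i]
--         while check_l and array[check_l[-1]] <= num:
--             check_l.pop()
--         if check_l:
--             dp[i] =check_l[-1]
--         check_l.append(i)
--     for i in range(length-1,-1,-1):
--         num = array[i]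
--         while check_r and array[check_r[-1]] <= num:
--             check_r.pop()
--         if check_r:
--             if dp[i] != -1 :
--                 dp[i] = min(dp[i], check_r[-1])
--             else:
--                 dp[i] = check_r[-1]
--         check_r.append(i)
--     return dp
-- ===== SOURCE B (Python) =====
-- def solution(array):
--     n = len(array)
--     result = []
--     for i, x in enumerate(array):
--         idx = next((j for j in range(i - 1, -1, -1) if array[j] > x), -1)
--         if idx == -1:
--             idx = next((j for j in range(i + 1, n) if array[j] > x), -1)
--         result.append(idx)
--     return result
-- ===== Notes on version B (the rewrite author's own statement) =====
-- stated objective: simpler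
-- what changed: Replaced the two monotonic-stack passes plus min-merge (and the length 0/1/2 guard block) with a single per-index pass that scans leftward for the first strictly greater element and falls back to a rightward scan.
-- intended difference: On two-element arrays with equal elements A's special-case branch returns [1, -1] (treating the equal neighbour as greater, contradicting the strict '>' rule A uses everywhere else), while B returns [-1, -1], the intended answer under the strict-greater rule. — e.g. on solution([0, 0]): A returns [1, -1], B returns [-1, -1]
import Mathlib
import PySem

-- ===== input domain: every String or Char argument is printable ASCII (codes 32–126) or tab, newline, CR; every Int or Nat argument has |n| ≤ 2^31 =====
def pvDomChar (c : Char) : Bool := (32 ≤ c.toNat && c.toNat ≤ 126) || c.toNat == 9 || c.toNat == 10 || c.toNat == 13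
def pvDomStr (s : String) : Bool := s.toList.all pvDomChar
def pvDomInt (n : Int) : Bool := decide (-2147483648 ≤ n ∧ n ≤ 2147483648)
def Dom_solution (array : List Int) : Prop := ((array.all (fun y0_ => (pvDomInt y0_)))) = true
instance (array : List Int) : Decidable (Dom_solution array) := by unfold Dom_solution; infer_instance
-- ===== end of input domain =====

-- B replaces A's two monotonic-stack passes with a plain per-index left-then-right scan; simpler, not faster.

-- ===== PORT A =====
-- the 'while check and array[check[-1]] <= num: check.pop()' loop; stack top is the list head
def popWhile (a : List Int) (num : Int) : List Nat → List Nat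
  | [] => []
  | t :: rest => if a.getD t 0 ≤ num then popWhile a num rest else t :: rest

-- body of A's first (left-to-right) loop, state = (check_l, dp)
def stepL (array : List Int) (s : List Nat × List Int) (i : Nat) : List Nat × List Int :=
  let num := array.getD i 0
  let st := popWhile array num s.1
  let dp := match st with
    | [] => s.2
    | t :: _ => s.2.set i ((t : Int))
  (i :: st, dp)

-- body of A's second (right-to-left) loop, state = (check_r, dp)
def stepR (array : List Int) (s : List Nat × List Int) (i : Nat) : List Nat × List Int :=
  let num := array.getD i 0
  let st := popWhile array num s.1
  let dp := match st with
    | [] => s.2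
    | t :: _ =>
      if s.2.getD i (-1) ≠ -1 then s.2.set i (min (s.2.getD i (-1)) ((t : Int)))
      else s.2.set i ((t : Int))
  (i :: st, dp)

def solution (array : List Int) : List Int :=
  let n := array.length
  if n = 0 then []
  else if n = 1 then [-1]
  else if n = 2 then
    (if array.getD 0 0 > array.getD 1 0 then [-1, 0] else [1, -1])
  else
    let r1 := (List.range n).foldl (stepL array) ([], List.replicate n (-1))
    let r2 := ((List.range n).reverse).foldl (stepR array) ([], r1.2)
    r2.2

-- ===== PORT B =====
-- 'next((j for j in range(i-1, -1, -1) if array[j] > x), -1)': scan i-1, i-2, …, 0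
def scanL (a : List Int) (x : Int) : Nat → Int
  | 0 => -1
  | j+1 => if a.getD j 0 > x then (j : Int) else scanL a x j

-- 'next((j for j in range(i+1, n) if array[j] > x), -1)': scan j, j+1, … for c steps
def scanR (a : List Int) (x : Int) : Nat → Nat → Int
  | 0, _ => -1
  | c+1, j => if a.getD j 0 > x then (j : Int) else scanR a x c (j+1)

def solution_alt (array : List Int) : List Int :=
  let n := array.length
  (List.range n).map fun i =>
    let x := array.getD i 0
    let l := scanL array x i
    if l ≠ -1 then l else scanR array x (n - (i+1)) (i+1)

-- ===== PRECONDITION & SPEC =====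
-- On two-element arrays with equal elements A's special-case branch returns [1, -1] (treating the
-- equal neighbour as greater, contradicting the strict '>' rule A uses everywhere else), while B
-- returns [-1, -1], the intended answer under the strict-greater rule.
def D_solution (array : List Int) : Prop :=
  array.length = 2 ∧ array.getD 0 0 = array.getD 1 0
instance (array : List Int) : Decidable (D_solution array) := by unfold D_solution; infer_instance

def Spec_solution (array : List Int) (out : List Int) : Prop := ¬ D_solution array → out = solution_alt array
instance (array : List Int) (out : List Int) : Decidable (Spec_solution array out) := by unfold Spec_solution; infer_instance

def pvDiffWitness_solution : List Int := [0, 0]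
def pvDiffWitnessOut_solution : (List Int) × (List Int) := ([1, -1], [-1, -1])

-- ===== CLAIM (what is proved, stated in full; the proofs are below) =====
def Claim_unchanged_solution : Prop := ∀ (array : List Int), Dom_solution array → Spec_solution array (solution array)
def Claim_changed_solution : Prop := Dom_solution (pvDiffWitness_solution) ∧ D_solution (pvDiffWitness_solution) ∧ solution (pvDiffWitness_solution) = pvDiffWitnessOut_solution.1 ∧ solution_alt (pvDiffWitness_solution) = pvDiffWitnessOut_solution.2 ∧ pvDiffWitnessOut_solution.1 ≠ pvDiffWitnessOut_solution.2
def Claim_exact_solution : Prop := ∀ (array : List Int), Dom_solution array → D_solution array → solution array ≠ solution_alt array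

-- ===== LEMMAS AND PROOFS =====

-- top of a stack as A's dp entry (-1 if empty)
def topD : List Nat → Int
  | [] => -1
  | t :: _ => (t : Int)

-- the value of check_l after the first k iterations of A's forward loop
def susMax (a : List Int) : Nat → List Nat
  | 0 => []
  | k+1 => k :: popWhile a (a.getD k 0) (susMax a k)

-- the value of check_r after processing indices k, k+1, …, k+c-1 downward (c = n - k)
def susRc (a : List Int) : Nat → Nat → List Nat
  | 0, _ => []
  | c+1, k => k :: popWhile a (a.getD k 0) (susRc a c (k+1))

-- A's final dp entry at index i, in closed form
def finalA (a : List Int) (n i : Nat) : Int :=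
  let l := scanL a (a.getD i 0) i
  let r := scanR a (a.getD i 0) (n - (i+1)) (i+1)
  if r = -1 then l else (if l ≠ -1 then min l r else r)

theorem popWhile_popWhile (a : List Int) {x y : Int} (h : y ≤ x) :
    ∀ st : List Nat, popWhile a x (popWhile a y st) = popWhile a x st := by
  intro st
  induction st with
  | nil => rfl
  | cons t rest ih =>
    by_cases ht : a.getD t 0 ≤ y
    · have htx : a.getD t 0 ≤ x := le_trans ht h
      simp only [popWhile]
      rw [if_pos ht, ih, if_pos htx]
    · simp only [popWhile]
      rw [if_neg ht]
      rfl

theorem topD_popWhile_susMax (a : List Int) (x : Int) :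
    ∀ k, topD (popWhile a x (susMax a k)) = scanL a x k := by
  intro k
  induction k with
  | zero => rfl
  | succ k ih =>
    by_cases h : a.getD k 0 ≤ x
    · have h' : ¬ a.getD k 0 > x := by omega
      simp only [susMax, popWhile, scanL]
      rw [if_pos h, if_neg h', popWhile_popWhile a h, ih]
    · have h' : a.getD k 0 > x := by omega
      simp only [susMax, popWhile, scanL]
      rw [if_neg h, if_pos h']
      rfl

theorem topD_popWhile_susRc (a : List Int) (x : Int) :
    ∀ c k, topD (popWhile a x (susRc a c k)) = scanR a x c k := by
  intro c
  induction c with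
  | zero => intro k; rfl
  | succ c ih =>
    intro k
    by_cases h : a.getD k 0 ≤ x
    · have h' : ¬ a.getD k 0 > x := by omega
      simp only [susRc, popWhile, scanR]
      rw [if_pos h, if_neg h', popWhile_popWhile a h, ih]
    · have h' : a.getD k 0 > x := by omega
      simp only [susRc, popWhile, scanR]
      rw [if_neg h, if_pos h']
      rfl

theorem scanL_range (a : List Int) (x : Int) :
    ∀ k, scanL a x k = -1 ∨ (0 ≤ scanL a x k ∧ scanL a x k < k) := by
  intro k
  induction k with
  | zero => left; rfl
  | succ k ih =>
    by_cases h : a.getD k 0 > x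
    · right
      simp only [scanL]
      rw [if_pos h]
      omega
    · rcases ih with h1 | h1
      · left
        simp only [scanL]
        rw [if_neg h]
        exact h1
      · right
        simp only [scanL]
        rw [if_neg h]
        omega

theorem scanR_range (a : List Int) (x : Int) :
    ∀ c k, scanR a x c k = -1 ∨ (k : Int) ≤ scanR a x c k := by
  intro c
  induction c with
  | zero => intro k; left; rfl
  | succ c ih =>
    intro k
    by_cases h : a.getD k 0 > x
    · right
      simp only [scanR]
      rw [if_pos h]
    · rcases ih (k+1) with h1 | h1
      · left
        simp only [scanR]
        rw [if_neg h]
        exact h1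
      · right
        simp only [scanR]
        rw [if_neg h]
        omega

theorem set_map_range {f : Nat → Int} {n k : Nat} (v : Int) :
    ((List.range n).map f).set k v =
    (List.range n).map (fun i => if i = k then v else f i) := by
  apply List.ext_getElem
  · simp
  · intro i h1 h2
    simp only [List.getElem_set, List.getElem_map, List.getElem_range]
    rcases eq_or_ne i k with h | h
    · simp [h]
    · rw [if_neg (Ne.symm h), if_neg h]

theorem getD_map_range {f : Nat → Int} {n i : Nat} (h : i < n) (d : Int) :
    ((List.range n).map f).getD i d = f i := by
  have h' : i < ((List.range n).map f).length := by simpa using h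
  rw [List.getD_eq_getElem _ _ h']
  simp

theorem finalA_of_rneg (a : List Int) (n i : Nat)
    (hR : scanR a (a.getD i 0) (n - (i+1)) (i+1) = -1) :
    finalA a n i = scanL a (a.getD i 0) i := by
  simp only [finalA]
  rw [hR, if_pos rfl]

theorem finalA_of_r (a : List Int) (n i t : Nat)
    (hR : scanR a (a.getD i 0) (n - (i+1)) (i+1) = (t : Int))
    (hl : scanL a (a.getD i 0) i ≠ -1) :
    finalA a n i = min (scanL a (a.getD i 0) i) (t : Int) := by
  simp only [finalA]
  rw [hR, if_neg (by omega : ¬ ((t : Int)) = -1), if_pos hl]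

theorem finalA_of_r_lneg (a : List Int) (n i t : Nat)
    (hR : scanR a (a.getD i 0) (n - (i+1)) (i+1) = (t : Int))
    (hl : scanL a (a.getD i 0) i = -1) :
    finalA a n i = (t : Int) := by
  simp only [finalA]
  rw [hR, if_neg (by omega : ¬ ((t : Int)) = -1), if_neg (not_not_intro hl)]

theorem foldl_stepL (a : List Int) (n : Nat) :
    ∀ k, k ≤ n →
    (List.range k).foldl (stepL a) ([], List.replicate n (-1)) =
    (susMax a k, (List.range n).map (fun i => if i < k then scanL a (a.getD i 0) i else -1)) := by
  intro k
  induction k with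
  | zero =>
    intro _
    simp only [List.range_zero, List.foldl_nil, susMax]
    refine Prod.ext rfl ?_
    apply List.ext_getElem <;> simp
  | succ k ih =>
    intro hk
    rw [List.range_succ, List.foldl_append, ih (by omega)]
    have htop := topD_popWhile_susMax a (a.getD k 0) k
    simp only [List.foldl_cons, List.foldl_nil, stepL]
    refine Prod.ext ?_ ?_
    · show k :: popWhile a (a.getD k 0) (susMax a k) = susMax a (k+1)
      rw [susMax]
    · cases hst : popWhile a (a.getD k 0) (susMax a k) with
      | nil =>
        have hL : scanL a (a.getD k 0) k = -1 := by rw [← htop, hst]; rfl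
        show (List.range n).map _ = (List.range n).map _
        apply List.map_congr_left
        intro i _
        rcases Nat.lt_trichotomy i k with h1 | h1 | h1
        · rw [if_pos h1, if_pos (by omega)]
        · subst h1
          rw [if_neg (by omega), if_pos (by omega), hL]
        · rw [if_neg (by omega), if_neg (by omega)]
      | cons t rest =>
        have hL : scanL a (a.getD k 0) k = (t : Int) := by rw [← htop, hst]; rfl
        show ((List.range n).map _).set k ((t : Int)) = (List.range n).map _
        rw [set_map_range]
        apply List.map_congr_left
        intro i _
        rcases Nat.lt_trichotomy i k with h1 | h1 | h1
        · rw [if_neg (by omega), if_pos h1, if_pos (by omega)]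
        · subst h1
          rw [if_pos rfl, if_pos (by omega), hL]
        · rw [if_neg (by omega), if_neg (by omega), if_neg (by omega)]

theorem foldl_stepR (a : List Int) (n : Nat) :
    ∀ m, m ≤ n →
    ((List.range m).reverse).foldl (stepR a)
      (susRc a (n - m) m,
       (List.range n).map (fun i => if i < m then scanL a (a.getD i 0) i else finalA a n i)) =
    (susRc a n 0, (List.range n).map (fun i => finalA a n i)) := by
  intro m
  induction m with
  | zero =>
    intro _
    simp
  | succ m ih =>
    intro hm
    have hrev : (List.range (m+1)).reverse = m :: (List.range m).reverse := by
      rw [List.range_succ]; simp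
    rw [hrev, List.foldl_cons]
    have hstep : stepR a
        (susRc a (n - (m+1)) (m+1),
         (List.range n).map (fun i => if i < m + 1 then scanL a (a.getD i 0) i else finalA a n i)) m =
        (susRc a (n - m) m,
         (List.range n).map (fun i => if i < m then scanL a (a.getD i 0) i else finalA a n i)) := by
      have htop := topD_popWhile_susRc a (a.getD m 0) (n - (m+1)) (m+1)
      have hmn : m < n := by omega
      have hget : ((List.range n).map (fun i => if i < m + 1 then scanL a (a.getD i 0) i else finalA a n i)).getD m (-1)
          = scanL a (a.getD m 0) m := by
        rw [getD_map_range hmn, if_pos (by omega)]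
      simp only [stepR]
      refine Prod.ext ?_ ?_
      · show m :: popWhile a (a.getD m 0) (susRc a (n - (m+1)) (m+1)) = susRc a (n - m) m
        have hnm : n - m = (n - (m+1)) + 1 := by omega
        rw [hnm, susRc]
      · cases hst : popWhile a (a.getD m 0) (susRc a (n - (m+1)) (m+1)) with
        | nil =>
          have hR : scanR a (a.getD m 0) (n - (m+1)) (m+1) = -1 := by rw [← htop, hst]; rfl
          show (List.range n).map _ = (List.range n).map _
          apply List.map_congr_left
          intro i _
          rcases Nat.lt_trichotomy i m with h1 | h1 | h1
          · rw [if_pos (by omega), if_pos h1]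
          · subst h1
            rw [if_pos (by omega), if_neg (by omega), finalA_of_rneg a n i hR]
          · rw [if_neg (by omega), if_neg (by omega)]
        | cons t rest =>
          have hR : scanR a (a.getD m 0) (n - (m+1)) (m+1) = (t : Int) := by rw [← htop, hst]; rfl
          dsimp only
          rw [hget]
          by_cases hl : scanL a (a.getD m 0) m ≠ -1
          · rw [if_pos hl]
            show ((List.range n).map _).set m _ = (List.range n).map _
            rw [set_map_range]
            apply List.map_congr_left
            intro i _
            rcases Nat.lt_trichotomy i m with h1 | h1 | h1
            · rw [if_neg (by omega), if_pos (by omega), if_pos h1]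
            · subst h1
              rw [if_pos rfl, if_neg (by omega), finalA_of_r a n i t hR hl]
            · rw [if_neg (by omega), if_neg (by omega), if_neg (by omega)]
          · rw [if_neg hl]
            have hl' : scanL a (a.getD m 0) m = -1 := by
              by_contra hc; exact hl hc
            show ((List.range n).map _).set m _ = (List.range n).map _
            rw [set_map_range]
            apply List.map_congr_left
            intro i _
            rcases Nat.lt_trichotomy i m with h1 | h1 | h1
            · rw [if_neg (by omega), if_pos (by omega), if_pos h1]
            · subst h1
              rw [if_pos rfl, if_neg (by omega), finalA_of_r_lneg a n i t hR hl']
            · rw [if_neg (by omega), if_neg (by omega), if_neg (by omega)]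
    rw [hstep, ih (by omega)]

theorem finalA_eq (a : List Int) (n i : Nat) (_hi : i < n) :
    finalA a n i =
    (let x := a.getD i 0
     let l := scanL a x i
     if l ≠ -1 then l else scanR a x (n - (i+1)) (i+1)) := by
  simp only [finalA]
  set l := scanL a (a.getD i 0) i with hl
  set r := scanR a (a.getD i 0) (n - (i+1)) (i+1) with hr
  by_cases h1 : l = -1
  · by_cases h2 : r = -1 <;> simp [h1, h2]
  · have hlb : 0 ≤ l ∧ l < (i : Int) := by
      rcases scanL_range a (a.getD i 0) i with h | h
      · exact absurd h h1
      · exact ⟨h.1, h.2⟩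
    by_cases h2 : r = -1
    · simp [h1, h2]
    · have hrb : ((i : Int) + 1) ≤ r := by
        rcases scanR_range a (a.getD i 0) (n - (i+1)) (i+1) with h | h
        · exact absurd h h2
        · exact_mod_cast h
      have : min l r = l := by omega
      simp [h1, h2, this]

-- main equivalence for length ≥ 3 (the stack passes compute the left-then-right nearest greater)
theorem solution_eq_big (a : List Int) (h3 : 3 ≤ a.length) :
    solution a = solution_alt a := by
  set n := a.length with hn
  have h0 : ¬ n = 0 := by omega
  have h1 : ¬ n = 1 := by omega
  have h2 : ¬ n = 2 := by omega
  have hfwd := foldl_stepL a n n (le_refl n)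
  have hfix : (List.range n).map (fun i => if i < n then scanL a (a.getD i 0) i else (-1 : Int)) =
      (List.range n).map (fun i => if i < n then scanL a (a.getD i 0) i else finalA a n i) := by
    apply List.map_congr_left
    intro i hi
    simp [List.mem_range.mp hi]
  have hbwd := foldl_stepR a n n (le_refl n)
  simp only [Nat.sub_self, susRc] at hbwd
  show (if n = 0 then [] else if n = 1 then [-1] else if n = 2 then _ else _) = _
  simp only [h0, h1, h2, if_false]
  rw [hfwd]
  simp only
  rw [hfix, hbwd]
  show (List.range n).map (fun i => finalA a n i) = solution_alt a
  simp only [solution_alt, ← hn]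
  apply List.map_congr_left
  intro i hi
  exact finalA_eq a n i (List.mem_range.mp hi)

-- ===== VERDICT (by name: the statement is the Claim_ definition above) =====
theorem solution_spec : Claim_unchanged_solution := by
  intro array _ hD
  show solution array = solution_alt array
  match array with
  | [] => rfl
  | [x] =>
    simp [solution, solution_alt, scanL, scanR, List.range_succ]
  | [x, y] =>
    have hxy : ¬ x = y := by
      intro h; exact hD ⟨rfl, by simp [h]⟩
    by_cases h : x > y
    · have hyx : ¬ y > x := by omega
      simp [solution, solution_alt, scanL, scanR, List.range_succ, h, hyx]
    · have hyx : y > x := by omega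
      have h' : ¬ x > y := h
      simp [solution, solution_alt, scanL, scanR, List.range_succ, h', hyx]
  | x :: y :: z :: rest =>
    exact solution_eq_big _ (by simp)

theorem solution_changed : Claim_changed_solution := by unfold Claim_changed_solution; decide

theorem solution_tight : Claim_exact_solution := by
  unfold Claim_exact_solution
  intro array _ hD
  obtain ⟨hlen, heq⟩ := hD
  match array, hlen with
  | [x, y], _ =>
    have hxy : x = y := by simpa using heq
    subst hxy
    simp [solution, solution_alt, scanL, scanR, List.range_succ]
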